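-- pv_equiv track=rewrite | github.com/pharrison31415/graph-vis-demo | wiki_circle.py | startswith_stupid
-- ===== SOURCE A (Python) =====
-- def startswith_stupid(href):
--     stupid = ["Category", "File", "Help", "Portal",
--               "Special", "Talk", "Template", "Template_talk", "Wikipedia"]
--     if href.startswith("/wiki/Main_Page"):
--         return True
--     for s in stupid:
--         if href.startswith(f"/wiki/{s}:"):
--             return True
--
--     return False
-- ===== SOURCE B (Python) =====
-- NAMESPACES = {"Category", "File", "Help", "Portal", "Special",
--               "Talk", "Template", "Template_talk", "Wikipedia"}
--
--
-- def startswith_stupid(href):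
--     if not href.startswith("/wiki/"):
--         return False
--     rest = href[6:]
--     if rest.startswith("Main_Page"):
--         return True
--     ns, sep, _ = rest.partition(":")
--     return sep == ":" and ns in NAMESPACES
-- ===== Notes on version B (the rewrite author's own statement) =====
-- stated objective: simpler
-- what changed: Replaces the loop over nine per-namespace startswith tests with one wiki-prefix guard, a partition of the remainder at the first colon, and a single set lookup of the extracted namespace.
import Mathlib
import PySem

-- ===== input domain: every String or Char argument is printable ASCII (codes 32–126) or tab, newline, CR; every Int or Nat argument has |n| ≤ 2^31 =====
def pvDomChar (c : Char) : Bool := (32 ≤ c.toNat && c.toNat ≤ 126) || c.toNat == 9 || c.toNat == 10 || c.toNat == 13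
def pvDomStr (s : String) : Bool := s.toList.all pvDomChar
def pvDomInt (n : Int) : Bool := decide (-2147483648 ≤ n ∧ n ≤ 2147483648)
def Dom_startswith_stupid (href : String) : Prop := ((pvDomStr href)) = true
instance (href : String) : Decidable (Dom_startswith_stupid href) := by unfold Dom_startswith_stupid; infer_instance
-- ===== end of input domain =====

-- B replaces A's per-prefix startswith loop by one '/wiki/' guard, a partition on the
-- first colon and a single set lookup of the namespace (objective: simpler).

-- ===== PORT A =====
-- the for-loop with early return over the prefix list
def swLoop (href : String) : List String → Bool
  | [] => false
  | s :: rest =>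
      if PySem.Str.startswith href ("/wiki/" ++ s ++ ":") then true
      else swLoop href rest

def startswith_stupid (href : String) : Bool :=
  let stupid := ["Category", "File", "Help", "Portal",
                 "Special", "Talk", "Template", "Template_talk", "Wikipedia"]
  if PySem.Str.startswith href "/wiki/Main_Page" then true
  else swLoop href stupid

-- ===== PORT B =====
-- hand port of rest.partition(":") (PySem has no partition): returns (before, sep-found?, after);
-- exact for the single-character separator ':'
def pyPartitionColon : List Char → List Char × Bool × List Char
  | [] => ([], false, [])
  | c :: cs =>
      if c = ':' then ([], true, cs)
      else
        let (a, b, r) := pyPartitionColon cs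
        (c :: a, b, r)

def pvNamespaces : PySem.Set String :=
  PySem.Set.ofList ["Category", "File", "Help", "Portal", "Special",
                    "Talk", "Template", "Template_talk", "Wikipedia"]

def startswith_stupid_alt (href : String) : Bool :=
  if !PySem.Str.startswith href "/wiki/" then false
  else
    let rest := PySem.Str.slice href (some 6) none
    if PySem.Str.startswith rest "Main_Page" then true
    else
      let (ns, sep, _) := pyPartitionColon rest.toList
      sep && PySem.Set.contains pvNamespaces (String.ofList ns)

-- ===== PRECONDITION & SPEC =====
def Spec_startswith_stupid (href : String) (out : Bool) : Prop := out = startswith_stupid_alt href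
instance (href : String) (out : Bool) : Decidable (Spec_startswith_stupid href out) := by unfold Spec_startswith_stupid; infer_instance

-- ===== CLAIM (what is proved, stated in full; the proofs are below) =====
def Claim_equal_startswith_stupid : Prop := ∀ (href : String), Dom_startswith_stupid href → Spec_startswith_stupid href (startswith_stupid href)

-- ===== LEMMAS AND PROOFS =====

-- splitting a prefix test at a concatenation point
theorem prefix_append_iff {α : Type} (a b l : List α) :
    a ++ b <+: l ↔ a <+: l ∧ b <+: l.drop a.length := by
  induction a generalizing l with
  | nil => simp
  | cons x a ih =>
      cases l with
      | nil => simp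
      | cons y l =>
          simp only [List.cons_append, List.cons_prefix_cons, List.length_cons, List.drop_succ_cons]
          rw [ih]
          tauto

-- characterisation of the partition helper
theorem pyPartitionColon_iff (ns : List Char) (h : ':' ∉ ns) (cs : List Char) :
    ((pyPartitionColon cs).2.1 = true ∧ (pyPartitionColon cs).1 = ns) ↔ ns ++ [':'] <+: cs := by
  induction cs generalizing ns with
  | nil =>
      simp [pyPartitionColon]
  | cons c cs ih =>
      by_cases hc : c = ':'
      · subst hc
        cases ns with
        | nil => simp [pyPartitionColon]
        | cons n ns =>
            simp only [pyPartitionColon, List.cons_append, List.cons_prefix_cons]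
            constructor
            · rintro ⟨-, heq⟩; cases heq
            · rintro ⟨rfl, -⟩; exact absurd (List.mem_cons_self) h
      · cases ns with
        | nil =>
            simp [pyPartitionColon, hc]
            intro habs
            exact hc habs.symm
        | cons n ns =>
            have hmem : ':' ∉ ns := fun hx => h (List.mem_cons_of_mem _ hx)
            simp only [pyPartitionColon, if_neg hc, List.cons_append, List.cons_prefix_cons]
            rw [← ih ns hmem]
            constructor
            · rintro ⟨hb, heq⟩
              cases heq
              exact ⟨rfl, hb, rfl⟩
            · rintro ⟨rfl, hb, heq⟩
              exact ⟨hb, by rw [heq]⟩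

-- the loop of A is an existential over the prefix list
theorem swLoop_iff (href : String) (ss : List String) :
    swLoop href ss = true ↔ ∃ s ∈ ss, "/wiki/".toList ++ (s.toList ++ [':']) <+: href.toList := by
  induction ss with
  | nil => simp [swLoop]
  | cons s ss ih =>
      simp only [swLoop]
      by_cases hp : PySem.Str.startswith href ("/wiki/" ++ s ++ ":") = true
      · rw [if_pos hp]
        have : "/wiki/".toList ++ (s.toList ++ [':']) <+: href.toList := by
          have := (PySem.Chars.startswith_iff (href.toList) (("/wiki/" ++ s ++ ":").toList)).mp (by simpa using hp)
          simpa using this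
        simp only [true_iff]
        exact ⟨s, List.mem_cons_self, this⟩
      · rw [if_neg hp, ih]
        constructor
        · rintro ⟨t, ht, hpre⟩; exact ⟨t, List.mem_cons_of_mem _ ht, hpre⟩
        · rintro ⟨t, ht, hpre⟩
          rcases List.mem_cons.mp ht with rfl | ht
          · exact absurd ((PySem.Chars.startswith_iff _ _).mpr (by simpa using hpre)) (by simpa using hp)
          · exact ⟨t, ht, hpre⟩

-- the nine namespaces as a plain list (proof-side name for the shared literal)
def pvStupidList : List String :=
  ["Category", "File", "Help", "Portal", "Special",
   "Talk", "Template", "Template_talk", "Wikipedia"]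

theorem ofList_eq_iff (l : List Char) (s : String) : String.ofList l = s ↔ l = s.toList := by
  constructor
  · rintro rfl; simp
  · rintro rfl; simp

theorem startswith_true_iff (s p : String) :
    PySem.Str.startswith s p = true ↔ p.toList <+: s.toList := by
  simp [PySem.Chars.startswith_iff]

theorem rest_toList (href : String) :
    (PySem.Str.slice href (some 6) none).toList = href.toList.drop 6 := by
  simp [PySem.Str.slice, PySem.List.slice_from]

theorem A_iff (href : String) : startswith_stupid href = true ↔
    ("/wiki/".toList <+: href.toList ∧ "Main_Page".toList <+: href.toList.drop 6) ∨
    ∃ s ∈ pvStupidList, "/wiki/".toList <+: href.toList ∧ s.toList ++ [':'] <+: href.toList.drop 6 := by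
  have hl : ("/wiki/".toList).length = 6 := rfl
  have hsplit : "/wiki/Main_Page".toList = "/wiki/".toList ++ "Main_Page".toList := rfl
  have hA : startswith_stupid href
      = (PySem.Str.startswith href "/wiki/Main_Page" || swLoop href pvStupidList) := by
    unfold startswith_stupid
    cases PySem.Str.startswith href "/wiki/Main_Page" <;> rfl
  rw [hA, Bool.or_eq_true, swLoop_iff, startswith_true_iff, hsplit, prefix_append_iff, hl]
  refine or_congr Iff.rfl (exists_congr fun s => and_congr_right fun _ => ?_)
  rw [prefix_append_iff, hl]

theorem B_iff (href : String) : startswith_stupid_alt href = true ↔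
    "/wiki/".toList <+: href.toList ∧
    (("Main_Page".toList <+: href.toList.drop 6) ∨
      ∃ s ∈ pvStupidList, s.toList ++ [':'] <+: href.toList.drop 6) := by
  rcases hp : pyPartitionColon ((PySem.Str.slice href (some 6) none).toList) with ⟨ns, sep, r⟩
  have halt : startswith_stupid_alt href
      = (PySem.Str.startswith href "/wiki/"
          && (PySem.Str.startswith (PySem.Str.slice href (some 6) none) "Main_Page"
              || (sep && PySem.Set.contains pvNamespaces (String.ofList ns)))) := by
    simp only [startswith_stupid_alt, hp]
    cases PySem.Str.startswith href "/wiki/" <;>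
      cases PySem.Str.startswith (PySem.Str.slice href (some 6) none) "Main_Page" <;> rfl
  have hset : PySem.Set.contains pvNamespaces (String.ofList ns) = true
      ↔ ∃ s ∈ pvStupidList, ns = s.toList := by
    have hpv : pvNamespaces = pvStupidList := by decide
    rw [PySem.Set.contains_iff, hpv]
    simp [pvStupidList, ofList_eq_iff]
  have hmp : PySem.Str.startswith (PySem.Str.slice href (some 6) none) "Main_Page" = true
      ↔ "Main_Page".toList <+: href.toList.drop 6 := by
    rw [startswith_true_iff, rest_toList]
  have hcolon : ∀ s ∈ pvStupidList,
      ((sep = true ∧ ns = s.toList) ↔ s.toList ++ [':'] <+: href.toList.drop 6) := by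
    intro s hs
    have hnc : ':' ∉ s.toList := by
      fin_cases hs <;> decide
    have := pyPartitionColon_iff s.toList hnc ((PySem.Str.slice href (some 6) none).toList)
    rw [hp] at this
    rw [rest_toList] at this
    exact this
  rw [halt, Bool.and_eq_true, Bool.or_eq_true, Bool.and_eq_true, hmp, hset, startswith_true_iff]
  refine and_congr Iff.rfl (or_congr Iff.rfl ?_)
  constructor
  · rintro ⟨hsep, s, hs, hns⟩
    exact ⟨s, hs, (hcolon s hs).mp ⟨hsep, hns⟩⟩
  · rintro ⟨s, hs, hc⟩
    obtain ⟨hsep, hns⟩ := (hcolon s hs).mpr hc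
    exact ⟨hsep, s, hs, hns⟩

-- ===== VERDICT (by name: the statement is the Claim_ definition above) =====
theorem startswith_stupid_spec : Claim_equal_startswith_stupid := by
  intro href _
  unfold Spec_startswith_stupid
  rw [Bool.eq_iff_iff, A_iff, B_iff]
  constructor
  · rintro (⟨hw, hm⟩ | ⟨s, hs, hw, hc⟩)
    · exact ⟨hw, Or.inl hm⟩
    · exact ⟨hw, Or.inr ⟨s, hs, hc⟩⟩
  · rintro ⟨hw, hm | ⟨s, hs, hc⟩⟩
    · exact Or.inl ⟨hw, hm⟩
    · exact Or.inr ⟨s, hs, hw, hc⟩
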